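-- pv_equiv track=rewrite | github.com/rockerishFox/AI_Lab1 | problema10.py | solve10
-- ===== SOURCE A (Python) =====
-- def solve10(matrix):
--     max = 0
--     line = -1
--     for j in range(len(matrix)):
--         ones = 0
--         row = matrix[j]
--         for i in range(len(row)):
--             if row[i] != 0:
--                 ones = len(row) - i
--                 break
--         if ones > max:
--             max = ones
--             line = j
--
--     return line + 1
-- ===== SOURCE B (Python) =====
-- def solve10(matrix):
--     # Different decomposition: build the score of every row (row length minus
--     # count of leading zeros, found by a while loop), then take the max and
--     # look up its first position, instead of A's single pass tracking argmax.
--     scores = []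
--     for row in matrix:
--         z = 0
--         while z < len(row) and row[z] == 0:
--             z += 1
--         scores.append(len(row) - z)
--     m = max(scores, default=0)
--     return scores.index(m) + 1 if m > 0 else 0
-- ===== Notes on version B (the rewrite author's own statement) =====
-- stated objective: alternative
-- what changed: A does one pass tracking a running (max, argmax) pair with an inner break loop; B first materialises each row's score (length minus leading-zero count counted by a while loop), then takes max() of the score list and returns the first index of that maximum.
import Mathlib
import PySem

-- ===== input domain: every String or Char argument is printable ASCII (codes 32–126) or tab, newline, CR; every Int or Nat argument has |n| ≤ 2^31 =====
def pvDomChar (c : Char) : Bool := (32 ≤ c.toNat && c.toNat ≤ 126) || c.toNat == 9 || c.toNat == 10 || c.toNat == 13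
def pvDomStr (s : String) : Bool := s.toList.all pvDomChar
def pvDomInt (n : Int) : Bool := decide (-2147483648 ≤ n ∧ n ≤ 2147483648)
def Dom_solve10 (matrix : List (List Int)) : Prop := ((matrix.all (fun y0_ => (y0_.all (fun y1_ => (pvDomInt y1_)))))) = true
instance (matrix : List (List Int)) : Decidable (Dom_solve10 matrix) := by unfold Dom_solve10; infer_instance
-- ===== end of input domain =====

-- B changes the decomposition only (scores list + max + first index); same results, similar cost.

-- ===== PORT A =====
-- inner 'for i in range(len(row)): if row[i] != 0: ones = len(row) - i; break' (i tracks the index)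
def onesGo (n : Nat) : Nat → List Int → Int
  | _, [] => 0
  | i, x :: xs => if x ≠ 0 then (n : Int) - (i : Int) else onesGo n (i + 1) xs

def onesA (row : List Int) : Int := onesGo row.length 0 row

-- outer loop: state (max, line), j tracks the row index
def loopA : Int × Int → Nat → List (List Int) → Int × Int
  | st, _, [] => st
  | st, j, row :: rest =>
      let ones := onesA row
      loopA (if ones > st.1 then (ones, (j : Int)) else st) (j + 1) rest

def solve10 (matrix : List (List Int)) : Int := (loopA (0, -1) 0 matrix).2 + 1

-- ===== PORT B =====
-- 'while z < len(row) and row[z] == 0: z += 1'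
def leadZeros : List Int → Nat
  | [] => 0
  | x :: xs => if x = 0 then leadZeros xs + 1 else 0

def scoreB (row : List Int) : Int := (row.length : Int) - (leadZeros row : Int)

def solve10_alt (matrix : List (List Int)) : Int :=
  let scores := matrix.map scoreB
  let m := (PySem.List.max? scores (fun v => v)).getD 0
  if m > 0 then ((PySem.List.index? scores m).getD 0 : Int) + 1 else 0

-- ===== PRECONDITION & SPEC =====
def Spec_solve10 (matrix : List (List Int)) (out : Int) : Prop := out = solve10_alt matrix
instance (matrix : List (List Int)) (out : Int) : Decidable (Spec_solve10 matrix out) := by unfold Spec_solve10; infer_instance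

-- ===== CLAIM (what is proved, stated in full; the proofs are below) =====
def Claim_equal_solve10 : Prop := ∀ (matrix : List (List Int)), Dom_solve10 matrix → Spec_solve10 matrix (solve10 matrix)

-- ===== LEMMAS AND PROOFS =====

theorem leadZeros_le (l : List Int) : leadZeros l ≤ l.length := by
  induction l with
  | nil => simp [leadZeros]
  | cons x xs ih => by_cases h : x = 0 <;> simp [leadZeros, h] <;> omega

theorem scoreB_nonneg (row : List Int) : 0 ≤ scoreB row := by
  have := leadZeros_le row
  simp [scoreB]; omega

theorem leadZeros_eq_len (l : List Int) (h : ∀ x ∈ l, x = 0) : leadZeros l = l.length := by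
  induction l with
  | nil => rfl
  | cons x xs ih =>
    have hx : x = 0 := h x (by simp)
    simp [leadZeros, hx, ih (fun y hy => h y (by simp [hy]))]

theorem onesGo_char (l : List Int) : ∀ (n i : Nat),
    onesGo n i l = if ∀ x ∈ l, x = 0 then 0 else (n : Int) - (i : Int) - (leadZeros l : Int) := by
  induction l with
  | nil => intro n i; simp [onesGo]
  | cons x xs ih =>
    intro n i
    by_cases hx : x = 0
    · subst hx
      have h1 : onesGo n i (0 :: xs) = onesGo n (i + 1) xs := by simp [onesGo]
      have h2 : leadZeros ((0 : Int) :: xs) = leadZeros xs + 1 := by simp [leadZeros]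
      have h3 : (∀ y ∈ (0 : Int) :: xs, y = 0) ↔ (∀ y ∈ xs, y = 0) := by simp
      rw [h1, ih n (i + 1), h2]
      by_cases hall : ∀ y ∈ xs, y = 0
      · rw [if_pos hall, if_pos (h3.mpr hall)]
      · rw [if_neg hall, if_neg (fun h => hall (h3.mp h))]
        push_cast; ring
    · have hno : ¬ ∀ y ∈ x :: xs, y = 0 := by intro h; exact hx (h x (by simp))
      simp [onesGo, hx, hno, leadZeros]

theorem onesA_eq_scoreB (row : List Int) : onesA row = scoreB row := by
  rw [onesA, onesGo_char]
  by_cases h : ∀ x ∈ row, x = 0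
  · simp [h, scoreB, leadZeros_eq_len row h]
  · simp [h, scoreB]

-- proof-side re-statement of loopA over the list of scores
def runMax : Int × Int → Nat → List Int → Int × Int
  | st, _, [] => st
  | st, j, v :: vs => runMax (if v > st.1 then (v, (j : Int)) else st) (j + 1) vs

theorem loopA_eq_runMax (rows : List (List Int)) : ∀ st j,
    loopA st j rows = runMax st j (rows.map onesA) := by
  induction rows with
  | nil => intro st j; rfl
  | cons r rs ih => intro st j; simp [loopA, runMax, ih]

theorem runMax_char (s : List Int) : ∀ (j : Nat) (st : Int × Int),
    runMax st j s =
      if s.foldl max st.1 > st.1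
      then (s.foldl max st.1,
            (j : Int) + (((PySem.List.index? s (s.foldl max st.1)).getD 0 : Nat) : Int))
      else st := by
  induction s with
  | nil => intro j st; simp [runMax]
  | cons v vs ih =>
    intro j st
    have hle : ∀ (a : Int), a ≤ vs.foldl max a := fun a => (PySem.List.le_foldl_max vs a).1
    by_cases hv : v > st.1
    · rw [runMax, if_pos hv, ih]
      have hfold : (v :: vs).foldl max st.1 = vs.foldl max v := by
        simp [List.foldl, max_eq_right (le_of_lt hv)]
      by_cases h2 : vs.foldl max v > v
      · -- max comes from vs
        have hmemor := PySem.List.foldl_max_mem vs v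
        have hmem : vs.foldl max v ∈ vs := by
          rcases hmemor with h | h
          · omega
          · exact h
        have hne : v ≠ vs.foldl max v := by omega
        have hidx : PySem.List.index? (v :: vs) (vs.foldl max v)
            = (PySem.List.index? vs (vs.foldl max v)).map (· + 1) :=
          PySem.List.index?_cons_of_ne (xs := vs) hne
        obtain ⟨k, hk⟩ := Option.isSome_iff_exists.mp
          ((PySem.List.index?_isSome_iff vs (vs.foldl max v)).mpr hmem)
        rw [if_pos h2, hfold, if_pos (by omega), hidx, hk]
        simp
        push_cast; ring
      · -- max is v itself
        have hmax : vs.foldl max v = v := le_antisymm (by omega) (hle v)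
        rw [if_neg h2, hfold, hmax, if_pos hv,
          PySem.List.index?_cons_self]
        simp
    · rw [runMax, if_neg hv, ih]
      have hvle : v ≤ st.1 := by omega
      have hfold : (v :: vs).foldl max st.1 = vs.foldl max st.1 := by
        simp [List.foldl, max_eq_left hvle]
      rw [hfold]
      by_cases h2 : vs.foldl max st.1 > st.1
      · have hmemor := PySem.List.foldl_max_mem vs st.1
        have hmem : vs.foldl max st.1 ∈ vs := by
          rcases hmemor with h | h
          · omega
          · exact h
        have hne : v ≠ vs.foldl max st.1 := by omega
        have hidx : PySem.List.index? (v :: vs) (vs.foldl max st.1)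
            = (PySem.List.index? vs (vs.foldl max st.1)).map (· + 1) :=
          PySem.List.index?_cons_of_ne (xs := vs) hne
        obtain ⟨k, hk⟩ := Option.isSome_iff_exists.mp
          ((PySem.List.index?_isSome_iff vs (vs.foldl max st.1)).mpr hmem)
        rw [if_pos h2, if_pos h2, hidx, hk]
        simp
        push_cast; ring
      · rw [if_neg h2, if_neg h2]

-- final comparison on an arbitrary list of nonnegative scores
theorem final_eq (s : List Int) (hpos : ∀ x ∈ s, 0 ≤ x) :
    (runMax (0, -1) 0 s).2 + 1 =
      (if (PySem.List.max? s (fun v => v)).getD 0 > 0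
       then (((PySem.List.index? s ((PySem.List.max? s (fun v => v)).getD 0)).getD 0 : Nat) : Int) + 1
       else 0) := by
  cases s with
  | nil => simp [runMax, PySem.List.max?]
  | cons x t =>
    have hx : 0 ≤ x := hpos x (by simp)
    rw [runMax_char]
    have hfold : (x :: t).foldl max (0 : Int) = t.foldl max x := by
      simp [List.foldl, max_eq_right hx]
    have hmax : (PySem.List.max? (x :: t) (fun v => v)).getD 0 = t.foldl max x := by
      rw [PySem.List.max?_id_cons]; rfl
    rw [hmax]
    simp only [hfold]
    by_cases h : t.foldl max x > 0
    · rw [if_pos h, if_pos h]; simp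
    · rw [if_neg h, if_neg h]; decide

-- ===== VERDICT (by name: the statement is the Claim_ definition above) =====
theorem solve10_spec : Claim_equal_solve10 := by
  intro matrix _
  unfold Spec_solve10 solve10 solve10_alt
  have hmap : matrix.map onesA = matrix.map scoreB :=
    List.map_congr_left (fun r _ => onesA_eq_scoreB r)
  rw [loopA_eq_runMax, hmap]
  have hpos : ∀ x ∈ matrix.map scoreB, 0 ≤ x := by
    intro x hx
    obtain ⟨r, _, hr⟩ := List.mem_map.mp hx
    exact hr ▸ scoreB_nonneg r
  exact final_eq (matrix.map scoreB) hpos
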